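-- pv_equiv track=rewrite | github.com/jy016011/algorithm-python | programmers/kakao_recruitment/compressing_string.py | solution
-- ===== SOURCE A (Python) =====
-- def solution(s):
--     answer = len(s)
--     for step in range(1, len(s) // 2 + 1):
--         chars = []
--         for start in range(0, len(s) - step + 1, step):
--             chars.append(s[start:start + step])
--         if len(s) % step != 0:
--             chars.append(s[-(len(s) % step):])
--         compressed = compress(chars)
--         answer = min(answer, len(compressed))
--     return answer
--
-- def compress(chars):
--     total_compressed = ""
--     idx = 0
--     while idx < len(chars):
--         cur = chars[idx]
--         count = 0
--         for following in chars[idx:]: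
--             if cur != following:
--                 break
--             count += 1
--             idx += 1
--         else:
--             idx += 1
--         compressed = str(count) + cur if count > 1 else cur
--         total_compressed += compressed
--     return total_compressed
-- ===== SOURCE B (Python) =====
-- def solution(s):
--     n = len(s)
--     best = n
--     for t in range(1, n // 2 + 1):
--         m = n // t
--         length = n
--         run = 1
--         ok = True
--         for i in range(t, m * t):
--             if s[i] != s[i - t]:
--                 ok = False
--             if i % t == t - 1:
--                 if ok:
--                     run += 1
--                     length -= t
--                 else:
--                     if run > 1:
--                         length += len(str(run))
--                     run = 1
--                 ok = True
--         if run > 1: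
--             length += len(str(run))
--         best = min(best, length)
--     return best
-- ===== Notes on version B (the rewrite author's own statement) =====
-- stated objective: alternative
-- what changed: B never builds chunk lists or compressed strings: for each period t it compares the string character-by-character against itself shifted by t (no slicing, no run-length pass over chunks), and maintains the compressed length arithmetically as n minus t per fully-matching shifted window plus the digit cost of each closed run.
import Mathlib
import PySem

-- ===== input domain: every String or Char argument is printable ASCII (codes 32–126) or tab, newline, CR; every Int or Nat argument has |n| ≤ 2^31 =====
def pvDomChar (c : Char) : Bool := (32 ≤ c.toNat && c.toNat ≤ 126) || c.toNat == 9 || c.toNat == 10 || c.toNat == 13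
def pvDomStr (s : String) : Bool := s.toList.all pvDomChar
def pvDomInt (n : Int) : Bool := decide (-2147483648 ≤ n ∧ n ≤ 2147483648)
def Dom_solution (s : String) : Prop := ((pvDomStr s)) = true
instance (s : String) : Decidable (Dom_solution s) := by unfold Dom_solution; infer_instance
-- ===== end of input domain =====

-- B never builds chunk lists or compressed strings: per period it compares the string
-- character-by-character with itself shifted by the period and keeps an arithmetic
-- length accumulator (alternative decomposition; not claimed faster).

-- ===== PORT A =====
-- inner 'for following in chars[idx:]' loop of compress: counts the leading run of blocks equal to cur
def runLenA (cur : List Char) : List (List Char) → Nat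
  | [] => 0
  | c :: rest => if c = cur then runLenA cur rest + 1 else 0

-- the while loop of compress, recursing on the suffix chars[idx:]
def compressA : List (List Char) → List Char
  | [] => []
  | cur :: rest =>
      (if runLenA cur rest + 1 > 1
         then (PySem.Int.toStr ((runLenA cur rest : Int) + 1)).toList ++ cur
         else cur)
      ++ compressA (rest.drop (runLenA cur rest))
termination_by l => l.length
decreasing_by simp

def solution (s : String) : Int :=
  let n : Int := PySem.Str.len s
  (PySem.List.pyRange 1 (PySem.Int.floordiv n 2 + 1) 1).foldl (fun answer step =>
    let chars := (PySem.List.pyRange 0 (n - step + 1) step).map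
        (fun start => PySem.List.slice s.toList (some start) (some (start + step)))
    let chars := if PySem.Int.mod n step ≠ 0
        then chars ++ [PySem.List.slice s.toList (some (-(PySem.Int.mod n step))) none]
        else chars
    min answer ((compressA chars).length : Int)) n

-- ===== PORT B =====
-- body of B's inner character loop: update 'ok' with the shifted-character comparison,
-- then at a window boundary (i % t == t-1) either merge the window or close the run
def bstep (l : List Char) (t : Int) (acc : Int × Bool × Int) (i : Int) : Int × Bool × Int :=
  let ok := if PySem.List.pyGet? l i ≠ PySem.List.pyGet? l (i - t) then false else acc.2.1
  if PySem.Int.mod i t = t - 1 then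
    if ok = true then (acc.1 + 1, true, acc.2.2 - t)
    else (1, true, acc.2.2 + (if acc.1 > 1 then ((PySem.Int.toStr acc.1).toList.length : Int) else 0))
  else (acc.1, ok, acc.2.2)

def solution_alt (s : String) : Int :=
  let n : Int := PySem.Str.len s
  (PySem.List.pyRange 1 (PySem.Int.floordiv n 2 + 1) 1).foldl (fun best t =>
    let m := PySem.Int.floordiv n t
    let st := (PySem.List.pyRange t (m * t) 1).foldl (bstep s.toList t) (1, true, n)
    min best (st.2.2 + (if st.1 > 1 then ((PySem.Int.toStr st.1).toList.length : Int) else 0))) n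

-- ===== PRECONDITION & SPEC =====
def Spec_solution (s : String) (out : Int) : Prop := out = solution_alt s
instance (s : String) (out : Int) : Decidable (Spec_solution s out) := by unfold Spec_solution; infer_instance

-- ===== CLAIM (what is proved, stated in full; the proofs are below) =====
def Claim_equal_solution : Prop := ∀ (s : String), Dom_solution s → Spec_solution s (solution s)

-- ===== LEMMAS AND PROOFS =====

def dl (c : Int) : Int := if c > 1 then ((PySem.Int.toStr c).toList.length : Int) else 0

def blockOf (l : List Char) (step : Int) (k : Nat) : List Char :=
  PySem.List.slice l (some (step * k)) (some (step * k + step))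

-- block-level meaning of one character-window of B: process block a+1 against block a
def Hstep (l : List Char) (S : Nat) (a : Nat) (rl : Int × Int) : Int × Int :=
  if blockOf l (S : Int) (a+1) = blockOf l (S : Int) a then (rl.1 + 1, rl.2 - (S : Int))
  else (1, rl.2 + dl rl.1)

theorem runLenA_le (cur : List Char) (l : List (List Char)) : runLenA cur l ≤ l.length := by
  induction l with
  | nil => simp [runLenA]
  | cons c rest ih => simp only [runLenA]; split <;> simp; omega

theorem runLenA_replicate_append (cur : List Char) (k : Nat) (rest : List (List Char)) :
    runLenA cur (List.replicate k cur ++ rest) = k + runLenA cur rest := by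
  induction k with
  | zero => simp
  | succ k ih => simp [List.replicate_succ, runLenA, ih]; omega

theorem runLenA_zero (cur : List Char) (rest : List (List Char))
    (h : rest = [] ∨ ∃ b bs, rest = b :: bs ∧ b ≠ cur) : runLenA cur rest = 0 := by
  rcases h with h | ⟨b, bs, rfl, hb⟩
  · simp [h, runLenA]
  · simp [runLenA, hb]

theorem compressA_run (cur : List Char) (c : Nat) (hc : 1 ≤ c) (rest : List (List Char))
    (h0 : runLenA cur rest = 0) :
    compressA (List.replicate c cur ++ rest)
      = (if c > 1 then (PySem.Int.toStr (c : Int)).toList ++ cur else cur) ++ compressA rest := by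
  obtain ⟨c', rfl⟩ : ∃ c', c = c' + 1 := ⟨c - 1, by omega⟩
  rw [List.replicate_succ, List.cons_append, compressA, runLenA_replicate_append, h0]
  have hdrop : (List.replicate c' cur ++ rest).drop (c' + 0) = rest := by
    simp
  rw [hdrop]
  norm_num

theorem runLenA_append_single (cur : List Char) (rest : List (List Char)) (rem : List Char)
    (hne : rem ≠ cur) : runLenA cur (rest ++ [rem]) = runLenA cur rest := by
  induction rest with
  | nil => simp [runLenA, hne]
  | cons c rest ih => simp only [List.cons_append, runLenA, ih]

theorem compressA_append_rem (S : Nat) (bs : List (List Char)) (rem : List Char)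
    (hne : bs ≠ []) (hlen : ∀ b ∈ bs, b.length = S) (hr : rem.length < S) :
    (compressA (bs ++ [rem])).length = (compressA bs).length + rem.length := by
  induction hN : bs.length using Nat.strong_induction_on generalizing bs with
  | _ N ih =>
  match bs, hne with
  | cur :: rest, _ =>
  have hcur : rem ≠ cur := by
    intro h; have := hlen cur (by simp); subst h; omega
  have hk := runLenA_le cur rest
  rw [List.cons_append, compressA, compressA,
      runLenA_append_single cur rest rem hcur,
      List.drop_append_of_le_length hk]
  rcases hdk : rest.drop (runLenA cur rest) with _ | ⟨b, bs'⟩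
  · simp [compressA, runLenA]
  · simp only [List.length_append]
    have hlen' : ∀ x ∈ b :: bs', x.length = S := fun x hx =>
      hlen x (List.mem_cons_of_mem _ (List.mem_of_mem_drop (hdk ▸ hx)))
    have hlt : (b :: bs').length < N := by
      have h2 : (rest.drop (runLenA cur rest)).length = (b :: bs').length := by rw [hdk]
      simp only [List.length_drop] at h2
      simp at hN
      omega
    have := ih (b :: bs').length hlt (b :: bs') (by simp) hlen' rfl
    omega

theorem blockOf_length (l : List Char) (S : Nat) (k : Nat) (hk : S * (k+1) ≤ l.length) :
    (blockOf l (S : Int) k).length = S := by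
  unfold blockOf
  rw [PySem.List.slice_toNat l (by positivity) (by positivity)]
  have h1 : ((S : Int) * (k : Int)).toNat = S * k := by
    rw [show (S : Int) * (k : Int) = ((S * k : Nat) : Int) by push_cast; ring]
    exact Int.toNat_natCast _
  have h2 : ((S : Int) * (k : Int) + (S : Int)).toNat = S * k + S := by
    rw [show (S : Int) * (k : Int) + (S : Int) = ((S * k + S : Nat) : Int) by push_cast; ring]
    exact Int.toNat_natCast _
  rw [h1, h2]
  simp only [List.length_take, List.length_drop]
  have : S * (k + 1) = S * k + S := by ring
  omega

theorem forall_lt_succ_iff (P : Nat → Prop) (q : Nat) :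
    (∀ j < q + 1, P j) ↔ (∀ j < q, P j) ∧ P q := by
  constructor
  · exact fun h => ⟨fun j hj => h j (by omega), h q (by omega)⟩
  · rintro ⟨h1, h2⟩ j hj
    rcases Nat.lt_or_ge j q with h | h
    · exact h1 j h
    · have : j = q := by omega
      subst this; exact h2

theorem mod_chunk (S a j : Nat) (hS : 1 ≤ S) (hj : j < S) :
    PySem.Int.mod (((a + 1) * S + j : Nat) : Int) (S : Int) = (j : Int) := by
  rw [PySem.Int.mod_eq_emod_of_pos (by exact_mod_cast hS)]
  have : (((a + 1) * S + j : Nat) : Int) = (j : Int) + (S : Int) * ((a : Int) + 1) := by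
    push_cast; ring
  rw [this, Int.add_mul_emod_self_left]
  exact Int.emod_eq_of_lt (by omega) (by exact_mod_cast hj)

theorem sub_shift (S a j : Nat) :
    (((a + 1) * S + j : Nat) : Int) - (S : Int) = ((a * S + j : Nat) : Int) := by
  push_cast; ring

-- after q < S characters of window a+1, B's state is (run, all-matched-so-far, len)
theorem chunk_prefix (l : List Char) (S : Nat) (hS : 1 ≤ S) (a : Nat) (run len : Int) :
    ∀ q, q < S →
    ((List.range q).map (fun j : Nat => (((a + 1) * S + j : Nat) : Int))).foldl
        (bstep l (S : Int)) (run, true, len)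
      = (run,
         decide (∀ j < q, PySem.List.pyGet? l (((a + 1) * S + j : Nat) : Int)
                           = PySem.List.pyGet? l ((a * S + j : Nat) : Int)),
         len) := by
  intro q
  induction q with
  | zero => intro _; simp
  | succ q ih =>
    intro hq
    rw [List.range_succ, List.map_append, List.foldl_append, ih (by omega)]
    simp only [List.map_cons, List.map_nil, List.foldl_cons, List.foldl_nil]
    rw [bstep, sub_shift, mod_chunk S a q hS (by omega)]
    have hne : ¬ ((q : Int) = (S : Int) - 1) := by
      have : q < S - 1 := by omega
      omega
    rw [if_neg hne]
    simp only [Prod.mk.injEq, true_and, and_true]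
    by_cases hlast : PySem.List.pyGet? l (((a + 1) * S + q : Nat) : Int)
        = PySem.List.pyGet? l ((a * S + q : Nat) : Int)
    · rw [if_neg (not_not_intro hlast), decide_eq_decide, forall_lt_succ_iff]
      exact ⟨fun h => ⟨h, hlast⟩, fun h => h.1⟩
    · rw [if_pos hlast]
      symm
      rw [decide_eq_false_iff_not, forall_lt_succ_iff]
      exact fun h => hlast h.2

theorem blockEq_iff (l : List Char) (S : Nat) (hS : 1 ≤ S) (a : Nat)
    (ha : (a + 2) * S ≤ l.length) :
    blockOf l (S : Int) (a + 1) = blockOf l (S : Int) a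
      ↔ ∀ j < S, PySem.List.pyGet? l (((a + 1) * S + j : Nat) : Int)
                  = PySem.List.pyGet? l ((a * S + j : Nat) : Int) := by
  have hlen1 : (blockOf l (S : Int) (a + 1)).length = S :=
    blockOf_length l S (a + 1) (by nlinarith)
  have hlen0 : (blockOf l (S : Int) a).length = S :=
    blockOf_length l S a (by nlinarith)
  have hget : ∀ (k : Nat) (j : Nat), j < S → S * (k + 1) ≤ l.length →
      (blockOf l (S : Int) k)[j]? = l[k * S + j]? := by
    intro k j hj hk
    unfold blockOf
    rw [PySem.List.slice_toNat l (by positivity) (by positivity)]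
    have h1 : ((S : Int) * (k : Int)).toNat = S * k := by
      rw [show (S : Int) * (k : Int) = ((S * k : Nat) : Int) by push_cast; ring]
      exact Int.toNat_natCast _
    have h2 : ((S : Int) * (k : Int) + (S : Int)).toNat = S * k + S := by
      rw [show (S : Int) * (k : Int) + (S : Int) = ((S * k + S : Nat) : Int) by push_cast; ring]
      exact Int.toNat_natCast _
    rw [h1, h2]
    have hjlt : j < l.length - S * k := by
      have : S * (k + 1) = S * k + S := by ring
      omega
    rw [List.getElem?_take_of_lt (by omega), List.getElem?_drop]
    congr 1
    ring
  constructor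
  · intro heq j hj
    have h1 := hget (a + 1) j hj (by nlinarith)
    have h0 := hget a j hj (by nlinarith)
    rw [PySem.List.pyGet?_natCast, PySem.List.pyGet?_natCast, ← h1, ← h0, heq]
  · intro hall
    apply List.ext_getElem (by omega)
    intro j hj1 hj0
    have hjS : j < S := by omega
    have h1 := hget (a + 1) j hjS (by nlinarith)
    have h0 := hget a j hjS (by nlinarith)
    have := hall j hjS
    rw [PySem.List.pyGet?_natCast, PySem.List.pyGet?_natCast, ← h1, ← h0] at this
    rw [List.getElem?_eq_getElem hj1, List.getElem?_eq_getElem hj0] at this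
    exact Option.some.inj this

-- one full character window of B acts on (run, length) as the block step Hstep
theorem chunk_fold (l : List Char) (S : Nat) (hS : 1 ≤ S) (a : Nat)
    (ha : (a + 2) * S ≤ l.length) (run len : Int) :
    ((List.range S).map (fun j : Nat => (((a + 1) * S + j : Nat) : Int))).foldl
        (bstep l (S : Int)) (run, true, len)
      = ((Hstep l S a (run, len)).1, true, (Hstep l S a (run, len)).2) := by
  obtain ⟨S', rfl⟩ : ∃ S', S = S' + 1 := ⟨S - 1, by omega⟩
  rw [List.range_succ, List.map_append, List.foldl_append,
      chunk_prefix l (S' + 1) hS a run len S' (by omega)]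
  simp only [List.map_cons, List.map_nil, List.foldl_cons, List.foldl_nil]
  rw [bstep, sub_shift, mod_chunk (S' + 1) a S' hS (by omega)]
  rw [if_pos (by push_cast; ring)]
  have hok : (if PySem.List.pyGet? l (((a + 1) * (S' + 1) + S' : Nat) : Int)
        ≠ PySem.List.pyGet? l ((a * (S' + 1) + S' : Nat) : Int) then false
      else decide (∀ j < S', PySem.List.pyGet? l (((a + 1) * (S' + 1) + j : Nat) : Int)
                           = PySem.List.pyGet? l ((a * (S' + 1) + j : Nat) : Int)))
      = decide (∀ j < S' + 1, PySem.List.pyGet? l (((a + 1) * (S' + 1) + j : Nat) : Int)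
                           = PySem.List.pyGet? l ((a * (S' + 1) + j : Nat) : Int)) := by
    by_cases hlast : PySem.List.pyGet? l (((a + 1) * (S' + 1) + S' : Nat) : Int)
        = PySem.List.pyGet? l ((a * (S' + 1) + S' : Nat) : Int)
    · rw [if_neg (not_not_intro hlast), decide_eq_decide, forall_lt_succ_iff]
      exact ⟨fun h => ⟨h, hlast⟩, fun h => h.1⟩
    · rw [if_pos hlast]
      symm
      rw [decide_eq_false_iff_not, forall_lt_succ_iff]
      exact fun h => hlast h.2
  rw [hok]
  unfold Hstep
  by_cases heq : blockOf l ((S' + 1 : Nat) : Int) (a + 1) = blockOf l ((S' + 1 : Nat) : Int) a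
  · have := (blockEq_iff l (S' + 1) hS a ha).mp heq
    rw [if_pos (by simpa using this), if_pos heq]
  · have : ¬ ∀ j < S' + 1, PySem.List.pyGet? l (((a + 1) * (S' + 1) + j : Nat) : Int)
        = PySem.List.pyGet? l ((a * (S' + 1) + j : Nat) : Int) := by
      intro h; exact heq ((blockEq_iff l (S' + 1) hS a ha).mpr h)
    rw [if_neg (by simpa using this), if_neg heq]
    simp [dl]

-- B's whole character pass for one period equals the block-level fold of Hstep
theorem charfold_eq (l : List Char) (S : Nat) (hS : 1 ≤ S) :
    ∀ (c : Nat), (c + 1) * S ≤ l.length → ∀ (run len : Int),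
    ((List.range (c * S)).map (fun k : Nat => ((S : Int) + (k : Int)))).foldl
        (bstep l (S : Int)) (run, true, len)
      = (((List.range c).foldl (fun rl j => Hstep l S j rl) (run, len)).1, true,
         ((List.range c).foldl (fun rl j => Hstep l S j rl) (run, len)).2) := by
  intro c
  induction c with
  | zero => intro _ run len; simp
  | succ c ih =>
    intro hc run len
    have hsplit : (c + 1) * S = c * S + S := by ring
    rw [hsplit, List.range_add, List.map_append, List.foldl_append,
        ih (by nlinarith) run len]
    have hmap : ((List.range S).map (fun i : Nat => c * S + i)).map
          (fun k : Nat => ((S : Int) + (k : Int)))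
        = (List.range S).map (fun j : Nat => (((c + 1) * S + j : Nat) : Int)) := by
      rw [List.map_map]
      apply List.map_congr_left
      intro j _
      simp only [Function.comp]
      push_cast; ring
    rw [hmap, chunk_fold l S hS c (by nlinarith) _ _]
    rw [List.range_succ, List.foldl_append]
    simp

-- accounting invariant: final length + trailing digit cost = initial length
-- + compressed length of the processed blocks − (blocks+1)·S
theorem foldH_eq (l : List Char) (S : Nat) (hS : 1 ≤ S) :
    ∀ (q a : Nat) (run len : Int), 1 ≤ run → (a + q + 1) * S ≤ l.length →
    (((List.range q).foldl (fun rl j => Hstep l S (a + j) rl) (run, len)).2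
      + dl ((List.range q).foldl (fun rl j => Hstep l S (a + j) rl) (run, len)).1)
      = len + ((compressA (List.replicate run.toNat (blockOf l (S : Int) a)
            ++ (List.range q).map (fun j => blockOf l (S : Int) (a + j + 1)))).length : Int)
          - ((q : Int) + 1) * (S : Int) := by
  intro q
  induction q with
  | zero =>
    intro a run len hrun ha
    have hblk : (blockOf l (S : Int) a).length = S := blockOf_length l S a (by nlinarith)
    have h0 : runLenA (blockOf l (S : Int) a) ([] : List (List Char)) = 0 := rfl
    have hsplit := compressA_run (blockOf l (S : Int) a) run.toNat (by omega) [] h0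
    simp only [List.append_nil] at hsplit
    simp only [List.range_zero, List.map_nil, List.foldl_nil, List.append_nil, hsplit]
    have hcast : ((run.toNat : Nat) : Int) = run := Int.toNat_of_nonneg (by omega)
    by_cases h : run > 1
    · rw [if_pos (by omega : run.toNat > 1)]
      simp only [dl, if_pos h, compressA, List.append_nil, List.length_append, hblk, hcast]
      push_cast; ring
    · rw [if_neg (by omega : ¬ run.toNat > 1)]
      simp only [dl, if_neg h, compressA, List.append_nil, hblk]
      push_cast; ring
  | succ q ih =>
    intro a run len hrun ha
    rw [List.range_succ_eq_map]
    simp only [List.foldl_cons, List.foldl_map, List.map_cons, List.map_map, Nat.add_zero]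
    have hfold : (fun (rl : Int × Int) (j : Nat) => Hstep l S (a + Nat.succ j) rl)
        = fun (rl : Int × Int) (j : Nat) => Hstep l S ((a + 1) + j) rl := by
      funext rl j
      congr 1
      omega
    rw [hfold]
    have hmap : (List.range q).map ((fun j => blockOf l (S : Int) (a + j + 1)) ∘ Nat.succ)
        = (List.range q).map (fun j => blockOf l (S : Int) ((a + 1) + j + 1)) := by
      apply List.map_congr_left
      intro j _
      simp only [Function.comp]
      congr 1
      omega
    rw [hmap]
    have hblk0 : (blockOf l (S : Int) a).length = S := blockOf_length l S a (by nlinarith)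
    by_cases heq : blockOf l (S : Int) (a + 1) = blockOf l (S : Int) a
    · have hhead : Hstep l S a (run, len) = (run + 1, len - (S : Int)) := by
        unfold Hstep; rw [if_pos heq]
      rw [hhead]
      have hih := ih (a + 1) (run + 1) (len - (S : Int)) (by omega) (by nlinarith)
      rw [hih]
      have hrepl : List.replicate (run + 1).toNat (blockOf l (S : Int) (a + 1))
            ++ (List.range q).map (fun j => blockOf l (S : Int) ((a + 1) + j + 1))
          = List.replicate run.toNat (blockOf l (S : Int) a)
            ++ blockOf l (S : Int) (a + 1)
              :: (List.range q).map (fun j => blockOf l (S : Int) ((a + 1) + j + 1)) := by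
        rw [heq, show (run + 1).toNat = run.toNat + 1 by omega, List.replicate_succ']
        simp
      rw [hrepl]
      push_cast; ring
    · have hhead : Hstep l S a (run, len) = (1, len + dl run) := by
        unfold Hstep; rw [if_neg heq]
      rw [hhead]
      have hih := ih (a + 1) 1 (len + dl run) (by omega) (by nlinarith)
      rw [hih]
      have hrepl1 : List.replicate (1 : Int).toNat (blockOf l (S : Int) (a + 1))
            ++ (List.range q).map (fun j => blockOf l (S : Int) ((a + 1) + j + 1))
          = blockOf l (S : Int) (a + 1)
              :: (List.range q).map (fun j => blockOf l (S : Int) ((a + 1) + j + 1)) := by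
        simp
      rw [hrepl1]
      have hsplit := compressA_run (blockOf l (S : Int) a) run.toNat (by omega)
        (blockOf l (S : Int) (a + 1)
          :: (List.range q).map (fun j => blockOf l (S : Int) ((a + 1) + j + 1)))
        (runLenA_zero _ _ (Or.inr ⟨_, _, rfl, heq⟩))
      rw [hsplit]
      have hcast : ((run.toNat : Nat) : Int) = run := Int.toNat_of_nonneg (by omega)
      by_cases h : run > 1
      · rw [if_pos (by omega : run.toNat > 1)]
        simp only [dl, if_pos h, List.length_append, hblk0, hcast]
        push_cast; ring
      · rw [if_neg (by omega : ¬ run.toNat > 1)]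
        simp only [dl, if_neg h, List.length_append, hblk0]
        push_cast; ring

-- per-period equality of A's value and B's value
theorem step_eq (l : List Char) (step : Int) (h1 : 1 ≤ step)
    (h2 : 2 * step ≤ (l.length : Int)) :
    ((compressA (if PySem.Int.mod (l.length : Int) step ≠ 0
        then ((PySem.List.pyRange 0 ((l.length : Int) - step + 1) step).map
               (fun start => PySem.List.slice l (some start) (some (start + step))))
             ++ [PySem.List.slice l (some (-(PySem.Int.mod (l.length : Int) step))) none]
        else (PySem.List.pyRange 0 ((l.length : Int) - step + 1) step).map
               (fun start => PySem.List.slice l (some start) (some (start + step))))).length : Int)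
    = (let st := (PySem.List.pyRange step (PySem.Int.floordiv (l.length : Int) step * step) 1).foldl
          (bstep l step) (1, true, (l.length : Int))
       st.2.2 + (if st.1 > 1 then ((PySem.Int.toStr st.1).toList.length : Int) else 0)) := by
  obtain ⟨S, rfl⟩ : ∃ S : Nat, step = (S : Int) := ⟨step.toNat, (Int.toNat_of_nonneg (by omega)).symm⟩
  have hS : 1 ≤ S := by exact_mod_cast h1
  set n : Int := (l.length : Int) with hn
  have hstep0 : (0:Int) < (S:Int) := by exact_mod_cast hS
  have hM2 : 2 ≤ n / (S:Int) := (Int.le_ediv_iff_mul_le hstep0).mpr (by linarith)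
  set M : Nat := (n / (S:Int)).toNat with hM
  have hMcast : (M : Int) = n / (S:Int) := Int.toNat_of_nonneg (by omega)
  have hM2' : 2 ≤ M := by omega
  have hMS : (M : Int) * (S : Int) ≤ n := by
    rw [hMcast]; exact Int.ediv_mul_le n (by omega)
  have hMSnat : M * S ≤ l.length := by
    have h := hMS
    rw [hn] at h
    exact_mod_cast h
  set r : Int := PySem.Int.mod n (S:Int) with hrdef
  have hre : r = n % (S:Int) := PySem.Int.mod_eq_emod_of_pos hstep0
  have hr0 : 0 ≤ r := by rw [hre]; exact Int.emod_nonneg n (by omega)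
  have hrS : r < (S:Int) := by rw [hre]; exact Int.emod_lt_of_pos n hstep0
  have hnMr : n = (M : Int) * (S : Int) + r := by
    rw [hre, hMcast]
    have := Int.emod_add_mul_ediv n (S : Int)
    linarith
  have hrangeA : PySem.List.pyRange 0 (n - (S:Int) + 1) (S:Int)
      = (List.range M).map (fun k : Nat => (S:Int) * k) := by
    rw [PySem.List.pyRange_of_pos _ _ hstep0, if_pos (by omega : (0:Int) < n - (S:Int) + 1)]
    rw [show n - (S:Int) + 1 - 0 + (S:Int) - 1 = n by ring]
    rw [← hM]
    simp
  set bs : List (List Char) := (List.range M).map (blockOf l (S:Int)) with hbs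
  have hAfull : ((PySem.List.pyRange 0 (n - (S:Int) + 1) (S:Int)).map
      (fun start => PySem.List.slice l (some start) (some (start + (S:Int))))) = bs := by
    rw [hrangeA, List.map_map, hbs]
    simp [blockOf, Function.comp]
  have hlenb : ∀ b ∈ bs, b.length = S := by
    intro b hb
    rw [hbs] at hb
    obtain ⟨k, hk, rfl⟩ := List.mem_map.mp hb
    rw [List.mem_range] at hk
    exact blockOf_length l S k (by nlinarith)
  have hbs_cons : bs = blockOf l (S:Int) 0
      :: (List.range (M-1)).map (fun k => blockOf l (S:Int) (k+1)) := by
    rw [hbs, show M = (M-1)+1 by omega, List.range_succ_eq_map, List.map_cons, List.map_map]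
    simp [Function.comp_def]
  -- B side: rewrite the pyRange and apply charfold_eq + foldH_eq
  have hflr : PySem.Int.floordiv n (S : Int) = (M : Int) := by
    rw [PySem.Int.floordiv_eq_ediv_of_pos hstep0, hMcast]
  have hrangeB : PySem.List.pyRange (S:Int) ((M : Int) * (S : Int)) 1
      = (List.range ((M - 1) * S)).map (fun k : Nat => ((S : Int) + (k : Int))) := by
    rw [PySem.List.pyRange_one]
    congr 1
    have : (M : Int) * (S : Int) - (S : Int) = (((M - 1) * S : Nat) : Int) := by
      push_cast [Nat.sub_mul, hM2']
      rw [Nat.cast_sub (by nlinarith : 1 * S ≤ M * S)]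
      push_cast; ring
    rw [this, Int.toNat_natCast]
  have hchar := charfold_eq l S hS (M - 1)
    (by rw [show (M - 1 + 1) = M by omega]; exact hMSnat) 1 n
  have hH := foldH_eq l S hS (M - 1) 0 1 n (by omega)
    (by rw [show (0 + (M - 1) + 1) = M by omega]; exact hMSnat)
  simp only [Nat.zero_add] at hH
  have hrepl1 : List.replicate (1 : Int).toNat (blockOf l (S : Int) 0)
        ++ (List.range (M - 1)).map (fun j => blockOf l (S : Int) (j + 1)) = bs := by
    rw [hbs_cons]; simp
  rw [hrepl1] at hH
  simp only
  rw [hflr, hrangeB, hchar]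
  simp only
  rw [show (if ((List.range (M - 1)).foldl (fun rl j => Hstep l S j rl) (1, n)).1 > 1
      then ((PySem.Int.toStr ((List.range (M - 1)).foldl (fun rl j => Hstep l S j rl) (1, n)).1).toList.length : Int) else 0)
      = dl ((List.range (M - 1)).foldl (fun rl j => Hstep l S j rl) (1, n)).1 from rfl]
  rw [hH]
  have hq1 : ((M - 1 : Nat) : Int) + 1 = (M : Int) := by
    push_cast [Nat.cast_sub (by omega : 1 ≤ M)]; ring
  rw [hq1]
  by_cases hrz : r = 0
  · rw [if_neg (by omega), hAfull]
    omega
  · rw [if_pos (by omega), hAfull]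
    have hrnat : (PySem.List.slice l (some (-r)) none).length = r.toNat := by
      rw [show -r = -((r.toNat : Nat) : Int) by omega]
      rw [PySem.List.slice_from_neg_natCast l r.toNat (by omega)]
      rw [List.length_drop]
      omega
    rw [compressA_append_rem S bs (PySem.List.slice l (some (-r)) none)
      (by rw [hbs_cons]; exact List.cons_ne_nil _ _) hlenb (by omega)]
    rw [hrnat]
    push_cast
    omega

-- ===== VERDICT (by name: the statement is the Claim_ definition above) =====
theorem solution_spec : Claim_equal_solution := by
  intro s _
  unfold Spec_solution solution solution_alt
  simp only [PySem.Str.len_eq]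
  apply PySem.List.foldl_congr_mem
  intro acc step hmem
  rw [PySem.List.mem_pyRange_one] at hmem
  rw [PySem.Int.floordiv_eq_ediv_of_pos (by norm_num)] at hmem
  have h2 : 2 * step ≤ (s.toList.length : Int) := by
    have := (Int.le_ediv_iff_mul_le (by norm_num : (0:Int) < 2)).mp (by omega : step ≤ (s.toList.length : Int) / 2)
    omega
  have := step_eq s.toList step hmem.1 h2
  simp only at this ⊢
  rw [this]
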